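-- pv_equiv track=rewrite | github.com/oleobal/processors | processor.py | getIntFromBoolList
-- ===== SOURCE A (Python) =====
-- def getIntFromBoolList(boollist, bigEndian=True):
-- 	"""
-- 	converts a list of bools into an int
-- 	"""
-- 	result = 0
-- 	if not bigEndian:
-- 		boollist.reverse()
-- 	for i in range(len(boollist)):
-- 		if boollist[i]:
-- 			result+=1
-- 		result<<=1
-- 	result>>=1 # else it's one bit too much
-- 	return result
-- ===== SOURCE B (Python) =====
-- def getIntFromBoolList(boollist, bigEndian=True):
--     """
--     converts a list of bools into an int
--     """
--     if not bigEndian: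
--         boollist.reverse()
--     return int('0' + ''.join('1' if b else '0' for b in boollist), 2)
-- ===== Notes on version B (the rewrite author's own statement) =====
-- stated objective: faster
-- what changed: Replaces the shift-and-accumulate index loop (with its trailing correction shift) by building a binary digit string and parsing it with int(s, 2); a leading '0' makes the empty list yield 0.
import Mathlib
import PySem

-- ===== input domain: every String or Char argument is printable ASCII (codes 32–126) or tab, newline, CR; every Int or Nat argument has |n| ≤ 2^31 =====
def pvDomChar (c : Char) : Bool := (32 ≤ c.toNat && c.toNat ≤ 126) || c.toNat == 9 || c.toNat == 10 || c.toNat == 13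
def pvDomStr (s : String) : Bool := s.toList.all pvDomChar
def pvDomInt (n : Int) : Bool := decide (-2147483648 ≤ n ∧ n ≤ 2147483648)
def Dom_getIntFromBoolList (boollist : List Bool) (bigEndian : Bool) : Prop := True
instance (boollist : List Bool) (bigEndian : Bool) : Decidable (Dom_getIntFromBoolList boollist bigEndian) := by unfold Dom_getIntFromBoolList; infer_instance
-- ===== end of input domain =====

-- B replaces A's shift-and-accumulate loop by building a binary digit string and parsing it
-- base 2 (more idiomatic); equivalence of RETURN values is proved (both Pythons reverse the
-- list in place when bigEndian is false, so the side effect is identical).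

-- ===== PORT A =====
-- A's loop over range(len(boollist)) reads boollist[i] in order; ported as a fold over the
-- (possibly reversed) list carrying `result`. `<<= 1` is *2, the final `>>= 1` is floor
-- division by 2 (exact for Python ints).
def getIntFromBoolList (boollist : List Bool) (bigEndian : Bool) : Int :=
  let l := if !bigEndian then boollist.reverse else boollist
  let result : Int := l.foldl (fun result b => (if b then result + 1 else result) * 2) 0
  PySem.Int.floordiv result 2

-- ===== PORT B =====
-- '1' if b else '0' digit chars, a leading '0', then int(s, 2): parse base 2 digit by digit.
def pvParseBin (cs : List Char) : Int :=
  cs.foldl (fun acc c => 2 * acc + (if c = '1' then 1 else 0)) 0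

def getIntFromBoolList_alt (boollist : List Bool) (bigEndian : Bool) : Int :=
  let l := if !bigEndian then boollist.reverse else boollist
  pvParseBin ('0' :: l.map (fun b => if b then '1' else '0'))

-- ===== PRECONDITION & SPEC =====
def Spec_getIntFromBoolList (boollist : List Bool) (bigEndian : Bool) (out : Int) : Prop := out = getIntFromBoolList_alt boollist bigEndian
instance (boollist : List Bool) (bigEndian : Bool) (out : Int) : Decidable (Spec_getIntFromBoolList boollist bigEndian out) := by unfold Spec_getIntFromBoolList; infer_instance

-- ===== CLAIM (what is proved, stated in full; the proofs are below) =====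
def Claim_equal_getIntFromBoolList : Prop := ∀ (boollist : List Bool) (bigEndian : Bool), Dom_getIntFromBoolList boollist bigEndian → Spec_getIntFromBoolList boollist bigEndian (getIntFromBoolList boollist bigEndian)

-- ===== LEMMAS AND PROOFS =====

-- A's accumulator is twice B's: pushing a bit in A's shape equals doubling B's shape.
theorem pvFold_double (l : List Bool) (a : Int) :
    l.foldl (fun result b => (if b then result + 1 else result) * 2) (2 * a)
      = 2 * l.foldl (fun acc b => 2 * acc + (if b then 1 else 0)) a := by
  induction l generalizing a with
  | nil => rfl
  | cons b t ih =>
    simp only [List.foldl_cons]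
    have : (if b then 2 * a + 1 else 2 * a) * 2 = 2 * (2 * a + (if b then 1 else 0)) := by
      cases b <;> simp <;> ring
    rw [this, ih]

theorem pvParseBin_map (l : List Bool) :
    pvParseBin ('0' :: l.map (fun b => if b then '1' else '0'))
      = l.foldl (fun acc b => 2 * acc + (if b then 1 else 0)) 0 := by
  unfold pvParseBin
  simp only [List.foldl_cons, List.foldl_map]
  have h0 : (2 * (0:Int) + (if ('0':Char) = '1' then 1 else 0)) = 0 := by decide
  rw [h0]
  congr 1
  funext acc b
  cases b <;> simp

-- ===== VERDICT (by name: the statement is the Claim_ definition above) =====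
theorem getIntFromBoolList_spec : Claim_equal_getIntFromBoolList := by
  intro boollist bigEndian _
  unfold Spec_getIntFromBoolList getIntFromBoolList getIntFromBoolList_alt
  set l := if !bigEndian then boollist.reverse else boollist with hl
  simp only
  rw [pvParseBin_map]
  have h := pvFold_double l 0
  rw [show (2:Int) * 0 = 0 by ring] at h
  rw [h, PySem.Int.floordiv_eq_ediv_of_pos (by norm_num)]
  omega
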